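-- pv_equiv track=rewrite | github.com/mukhtar-github/taxpoynt-platform | platform/backend/external_integrations/business_systems/pos/clover/data_extractor.py | _standardize_payment_type
-- ===== SOURCE A (Python) =====
-- def _standardize_payment_type(label_key: str) -> str:
--     """Standardize payment type name."""
--     label_upper = label_key.upper()
--
--     if 'CASH' in label_upper:
--         return 'CASH'
--     elif any(word in label_upper for word in ['CREDIT', 'DEBIT', 'CARD']):
--         return 'CARD'
--     elif 'CHECK' in label_upper:
--         return 'CHECK'
--     elif 'GIFT' in label_upper:
--         return 'GIFT_CARD'
--     elif any(word in label_upper for word in ['MOBILE', 'DIGITAL']):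
--         return 'MOBILE_PAY'
--     else:
--         return 'OTHER'
-- ===== SOURCE B (Python) =====
-- # Single left-to-right scan of the string with a best-rank accumulator: at each
-- # position record the best (lowest) priority of any keyword starting there,
-- # then map the final rank to its label (A instead tests whole-string membership
-- # branch by branch).
-- _RANKED_KEYWORDS = (
--     ('CASH', 0), ('CREDIT', 1), ('DEBIT', 1), ('CARD', 1),
--     ('CHECK', 2), ('GIFT', 3), ('MOBILE', 4), ('DIGITAL', 4),
-- )
-- _LABELS = ('CASH', 'CARD', 'CHECK', 'GIFT_CARD', 'MOBILE_PAY', 'OTHER')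
--
-- def _standardize_payment_type(label_key: str) -> str:
--     """Standardize payment type name."""
--     s = label_key.upper()
--     best = 5
--     for i in range(len(s)):
--         for word, rank in _RANKED_KEYWORDS:
--             if rank < best and s.startswith(word, i):
--                 best = rank
--     return _LABELS[best]
-- ===== Notes on version B (the rewrite author's own statement) =====
-- stated objective: alternative
-- what changed: Replaces A's branch-by-branch whole-string substring tests with a single left-to-right scan over positions that keeps the lowest priority rank of any keyword starting at each position, then maps the final rank to its label.
import Mathlib
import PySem

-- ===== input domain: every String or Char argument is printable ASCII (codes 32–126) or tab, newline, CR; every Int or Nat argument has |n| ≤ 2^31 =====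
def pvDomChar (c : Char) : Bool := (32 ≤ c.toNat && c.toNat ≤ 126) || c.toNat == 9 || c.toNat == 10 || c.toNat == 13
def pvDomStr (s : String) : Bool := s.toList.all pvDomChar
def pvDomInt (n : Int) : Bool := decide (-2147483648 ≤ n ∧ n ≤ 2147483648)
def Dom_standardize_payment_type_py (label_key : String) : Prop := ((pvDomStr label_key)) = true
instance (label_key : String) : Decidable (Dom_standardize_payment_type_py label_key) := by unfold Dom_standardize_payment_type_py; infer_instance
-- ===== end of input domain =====

-- B replaces A's branch-by-branch substring tests with a single left-to-right positional scan keeping a best-rank accumulator (alternative algorithm, same cost).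


-- ===== PORT A =====
-- Literal transliteration of A's if/elif cascade.
def standardize_payment_type_py (label_key : String) : String :=
  let label_upper := PySem.Str.upper label_key
  if PySem.Str.isIn "CASH" label_upper then "CASH"
  else if ["CREDIT", "DEBIT", "CARD"].any (fun word => PySem.Str.isIn word label_upper) then "CARD"
  else if PySem.Str.isIn "CHECK" label_upper then "CHECK"
  else if PySem.Str.isIn "GIFT" label_upper then "GIFT_CARD"
  else if ["MOBILE", "DIGITAL"].any (fun word => PySem.Str.isIn word label_upper) then "MOBILE_PAY"
  else "OTHER"

-- ===== PORT B =====
-- B: one scan over positions i, keeping the lowest rank of any keyword starting at i.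
def pvRankedKw : List (List Char × Nat) :=
  [("CASH".toList, 0), ("CREDIT".toList, 1), ("DEBIT".toList, 1), ("CARD".toList, 1),
   ("CHECK".toList, 2), ("GIFT".toList, 3), ("MOBILE".toList, 4), ("DIGITAL".toList, 4)]

def pvLabels : List String := ["CASH", "CARD", "CHECK", "GIFT_CARD", "MOBILE_PAY", "OTHER"]

-- Python's s.startswith(word, i) with 0 ≤ i < len(s) is exactly PySem.Chars.startswith (s.drop i) word.
-- _LABELS[best] is always in range (best ≤ 5), ported as getD with an unreachable default.
def standardize_payment_type_py_alt (label_key : String) : String :=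
  let s := (PySem.Str.upper label_key).toList
  let best := (List.range s.length).foldl
    (fun best i => pvRankedKw.foldl
      (fun best wr =>
        if wr.2 < best ∧ PySem.Chars.startswith (s.drop i) wr.1 = true then wr.2 else best)
      best) 5
  pvLabels.getD best "OTHER"

-- ===== PRECONDITION & SPEC =====
def Spec_standardize_payment_type_py (label_key : String) (out : String) : Prop := out = standardize_payment_type_py_alt label_key
instance (label_key : String) (out : String) : Decidable (Spec_standardize_payment_type_py label_key out) := by unfold Spec_standardize_payment_type_py; infer_instance

-- ===== CLAIM (what is proved, stated in full; the proofs are below) =====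
def Claim_equal_standardize_payment_type_py : Prop := ∀ (label_key : String), Dom_standardize_payment_type_py label_key → Spec_standardize_payment_type_py label_key (standardize_payment_type_py label_key)

-- ===== LEMMAS AND PROOFS =====

-- The ranks of all keyword occurrences in s (one entry per position × matching keyword).
def kwCands (s : List Char) : List Nat :=
  (List.range s.length).flatMap (fun i =>
    pvRankedKw.filterMap (fun wr =>
      if PySem.Chars.startswith (s.drop i) wr.1 = true then some wr.2 else none))

lemma foldl_min_le_init (xs : List Nat) (b : Nat) : xs.foldl min b ≤ b := by
  induction xs generalizing b with
  | nil => simp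
  | cons x xs ih =>
    rw [List.foldl_cons]
    exact le_trans (ih _) (min_le_left _ _)

lemma foldl_min_le_mem {r : Nat} {xs : List Nat} (h : r ∈ xs) (b : Nat) :
    xs.foldl min b ≤ r := by
  induction xs generalizing b with
  | nil => cases h
  | cons x xs ih =>
    rw [List.foldl_cons]
    rcases List.mem_cons.mp h with rfl | h
    · exact le_trans (foldl_min_le_init _ _) (min_le_right _ _)
    · exact ih h _

lemma foldl_min_mem_or (xs : List Nat) (b : Nat) :
    xs.foldl min b = b ∨ xs.foldl min b ∈ xs := by
  induction xs generalizing b with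
  | nil => left; rfl
  | cons x xs ih =>
    rw [List.foldl_cons]
    rcases ih (min b x) with h | h
    · rcases le_total b x with hbx | hbx
      · left; rw [h]; omega
      · right
        rw [h]
        have hx : min b x = x := by omega
        rw [hx]
        exact List.mem_cons_self
    · right; exact List.mem_cons_of_mem _ h

lemma inner_fold_eq (l : List (List Char × Nat)) (d : List Char) (b : Nat) :
    l.foldl (fun best wr =>
        if wr.2 < best ∧ PySem.Chars.startswith d wr.1 = true then wr.2 else best) b
    = (l.filterMap (fun wr =>
        if PySem.Chars.startswith d wr.1 = true then some wr.2 else none)).foldl min b := by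
  induction l generalizing b with
  | nil => rfl
  | cons x l ih =>
    rw [List.foldl_cons, List.filterMap_cons]
    by_cases hp : PySem.Chars.startswith d x.1 = true
    · rw [if_pos hp, List.foldl_cons, ih]
      congr 1
      split_ifs with h1
      · omega
      · have h2 : ¬ x.2 < b := fun hlt => h1 ⟨hlt, hp⟩
        omega
    · rw [if_neg hp, if_neg (by tauto), ih]

lemma foldl_min_flat (xs : List Nat) (g : Nat → List Nat) (b : Nat) :
    xs.foldl (fun b i => (g i).foldl min b) b = (xs.flatMap g).foldl min b := by
  induction xs generalizing b with
  | nil => rfl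
  | cons x xs ih => rw [List.foldl_cons, List.flatMap_cons, List.foldl_append, ih]

lemma best_eq (s : List Char) :
    (List.range s.length).foldl
      (fun best i => pvRankedKw.foldl
        (fun best wr =>
          if wr.2 < best ∧ PySem.Chars.startswith (s.drop i) wr.1 = true then wr.2 else best)
        best) 5
    = (kwCands s).foldl min 5 := by
  unfold kwCands
  simp only [inner_fold_eq]
  exact foldl_min_flat _ _ _

lemma mem_kwCands (s : List Char) (r : Nat) :
    r ∈ kwCands s ↔ ∃ wr ∈ pvRankedKw, wr.2 = r ∧ PySem.Chars.isIn wr.1 s = true := by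
  unfold kwCands
  simp only [List.mem_flatMap, List.mem_range, List.mem_filterMap]
  constructor
  · rintro ⟨i, _, wr, hmem, hif⟩
    by_cases hp : PySem.Chars.startswith (List.drop i s) wr.1 = true
    · rw [if_pos hp] at hif
      exact ⟨wr, hmem, Option.some.injEq _ _ ▸ hif,
        (PySem.Chars.exists_prefix_drop_iff_isIn wr.1 s).mp
          ⟨i, (PySem.Chars.startswith_iff _ _).mp hp⟩⟩
    · rw [if_neg hp] at hif
      exact absurd hif (by simp)
  · rintro ⟨wr, hmem, hr, hin⟩
    obtain ⟨j, hj⟩ := (PySem.Chars.exists_prefix_drop_iff_isIn wr.1 s).mpr hin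
    have hne : wr.1 ≠ [] := by
      simp only [pvRankedKw, List.mem_cons, List.not_mem_nil, or_false] at hmem
      rcases hmem with rfl | rfl | rfl | rfl | rfl | rfl | rfl | rfl <;> decide
    have hjlt : j < s.length := by
      by_contra h
      push Not at h
      rw [List.drop_eq_nil_of_le h] at hj
      exact hne (List.prefix_nil.mp hj)
    exact ⟨j, hjlt, wr, hmem,
      by rw [if_pos ((PySem.Chars.startswith_iff _ _).mpr hj), hr]⟩

-- A's cascade, on the uppercased character list, computes the label of the minimum rank.
lemma cascade_eq (s : List Char) :
    (if PySem.Chars.isIn "CASH".toList s = true then "CASH"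
     else if (PySem.Chars.isIn "CREDIT".toList s = true ∨
              PySem.Chars.isIn "DEBIT".toList s = true ∨
              PySem.Chars.isIn "CARD".toList s = true) then "CARD"
     else if PySem.Chars.isIn "CHECK".toList s = true then "CHECK"
     else if PySem.Chars.isIn "GIFT".toList s = true then "GIFT_CARD"
     else if (PySem.Chars.isIn "MOBILE".toList s = true ∨
              PySem.Chars.isIn "DIGITAL".toList s = true) then "MOBILE_PAY"
     else "OTHER")
    = pvLabels.getD ((kwCands s).foldl min 5) "OTHER" := by
  have hub : ∀ wr ∈ pvRankedKw, PySem.Chars.isIn wr.1 s = true →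
      (kwCands s).foldl min 5 ≤ wr.2 := fun wr h1 h2 =>
    foldl_min_le_mem ((mem_kwCands s wr.2).mpr ⟨wr, h1, rfl, h2⟩) 5
  have hor := foldl_min_mem_or (kwCands s) 5
  have hle : (kwCands s).foldl min 5 ≤ 5 := foldl_min_le_init _ _
  generalize hm : (kwCands s).foldl min 5 = m at hub hor hle
  by_cases c0 : PySem.Chars.isIn "CASH".toList s = true
  · have h0 : m = 0 := Nat.le_zero.mp (hub ("CASH".toList, 0) (by simp [pvRankedKw]) c0)
    rw [if_pos c0, h0]; rfl
  · have hn0 : m ≠ 0 := by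
      intro h
      rcases hor with h5 | hmem
      · omega
      · rw [h] at hmem
        obtain ⟨wr, hw, hr, hin⟩ := (mem_kwCands s 0).mp hmem
        simp only [pvRankedKw, List.mem_cons, List.not_mem_nil, or_false] at hw
        rcases hw with rfl | rfl | rfl | rfl | rfl | rfl | rfl | rfl <;>
          first | exact c0 hin | simp at hr
    rw [if_neg c0]
    by_cases c1 : (PySem.Chars.isIn "CREDIT".toList s = true ∨
        PySem.Chars.isIn "DEBIT".toList s = true ∨ PySem.Chars.isIn "CARD".toList s = true)
    · have h1 : m ≤ 1 := by
        rcases c1 with h | h | h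
        · exact hub ("CREDIT".toList, 1) (by simp [pvRankedKw]) h
        · exact hub ("DEBIT".toList, 1) (by simp [pvRankedKw]) h
        · exact hub ("CARD".toList, 1) (by simp [pvRankedKw]) h
      have : m = 1 := by omega
      rw [if_pos c1, this]; rfl
    · push Not at c1
      obtain ⟨c1a, c1b, c1c⟩ := c1
      have hn1 : m ≠ 1 := by
        intro h
        rcases hor with h5 | hmem
        · omega
        · rw [h] at hmem
          obtain ⟨wr, hw, hr, hin⟩ := (mem_kwCands s 1).mp hmem
          simp only [pvRankedKw, List.mem_cons, List.not_mem_nil, or_false] at hw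
          rcases hw with rfl | rfl | rfl | rfl | rfl | rfl | rfl | rfl <;>
            first | exact c1a hin | exact c1b hin | exact c1c hin | simp at hr
      rw [if_neg (by tauto)]
      by_cases c2 : PySem.Chars.isIn "CHECK".toList s = true
      · have h2 : m ≤ 2 := hub ("CHECK".toList, 2) (by simp [pvRankedKw]) c2
        have : m = 2 := by omega
        rw [if_pos c2, this]; rfl
      · have hn2 : m ≠ 2 := by
          intro h
          rcases hor with h5 | hmem
          · omega
          · rw [h] at hmem
            obtain ⟨wr, hw, hr, hin⟩ := (mem_kwCands s 2).mp hmem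
            simp only [pvRankedKw, List.mem_cons, List.not_mem_nil, or_false] at hw
            rcases hw with rfl | rfl | rfl | rfl | rfl | rfl | rfl | rfl <;>
              first | exact c2 hin | simp at hr
        rw [if_neg c2]
        by_cases c3 : PySem.Chars.isIn "GIFT".toList s = true
        · have h3 : m ≤ 3 := hub ("GIFT".toList, 3) (by simp [pvRankedKw]) c3
          have : m = 3 := by omega
          rw [if_pos c3, this]; rfl
        · have hn3 : m ≠ 3 := by
            intro h
            rcases hor with h5 | hmem
            · omega
            · rw [h] at hmem
              obtain ⟨wr, hw, hr, hin⟩ := (mem_kwCands s 3).mp hmem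
              simp only [pvRankedKw, List.mem_cons, List.not_mem_nil, or_false] at hw
              rcases hw with rfl | rfl | rfl | rfl | rfl | rfl | rfl | rfl <;>
                first | exact c3 hin | simp at hr
          rw [if_neg c3]
          by_cases c4 : (PySem.Chars.isIn "MOBILE".toList s = true ∨
              PySem.Chars.isIn "DIGITAL".toList s = true)
          · have h4 : m ≤ 4 := by
              rcases c4 with h | h
              · exact hub ("MOBILE".toList, 4) (by simp [pvRankedKw]) h
              · exact hub ("DIGITAL".toList, 4) (by simp [pvRankedKw]) h
            have : m = 4 := by omega
            rw [if_pos c4, this]; rfl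
          · push Not at c4
            obtain ⟨c4a, c4b⟩ := c4
            have hn4 : m ≠ 4 := by
              intro h
              rcases hor with h5 | hmem
              · omega
              · rw [h] at hmem
                obtain ⟨wr, hw, hr, hin⟩ := (mem_kwCands s 4).mp hmem
                simp only [pvRankedKw, List.mem_cons, List.not_mem_nil, or_false] at hw
                rcases hw with rfl | rfl | rfl | rfl | rfl | rfl | rfl | rfl <;>
                  first | exact c4a hin | exact c4b hin | simp at hr
            have : m = 5 := by omega
            rw [if_neg (by tauto), this]; rfl

-- ===== VERDICT (by name: the statement is the Claim_ definition above) =====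
theorem standardize_payment_type_py_spec : Claim_equal_standardize_payment_type_py := by
  intro label_key _
  unfold Spec_standardize_payment_type_py standardize_payment_type_py standardize_payment_type_py_alt
  simp only [best_eq, List.any_cons, List.any_nil, Bool.or_false, Bool.or_eq_true,
    PySem.Str.isIn_eq]
  exact cascade_eq ((PySem.Str.upper label_key).toList)
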